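-- pv_equiv track=rewrite | github.com/erikgust2/JSON-Request-Handling-From-Spec | Schema Compliant Script Files/ada_generator.py | generate_serialization_subprograms
-- ===== SOURCE A (Python) =====
-- def generate_serialization_subprograms(class_name, fields):
--     serialization_procedures = f'''
--    function To_JSON (Self : {class_name}) return GNATCOLL.JSON.JSON_Value'Class is
--       J : GNATCOLL.JSON.JSON_Object := GNATCOLL.JSON.Create_Object;
--    begin'''
--     for field_name, field_def in fields:
--         field_type = field_def.get('type')
--         if field_type == 'enum':
--             serialization_procedures += f'''
--       J.Set_Field ("{field_name}", GNATCOLL.JSON.To_JSON (GNATCOLL.JSON.Create_String (To_String (Self.{field_name}))));'''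
--         elif field_type in ['integer', 'number']:
--             serialization_procedures += f'''
--       J.Set_Field ("{field_name}", GNATCOLL.JSON.To_JSON (Self.{field_name}));'''
--         elif field_type == 'string':
--             serialization_procedures += f'''
--       J.Set_Field ("{field_name}", GNATCOLL.JSON.Create_String (To_Unbounded_String (Self.{field_name})));'''
--         elif field_type == 'boolean':
--             serialization_procedures += f'''
--       J.Set_Field ("{field_name}", GNATCOLL.JSON.To_JSON (Self.{field_name}));'''
--         elif field_type == 'array':
--             serialization_procedures += f'''
--       -- Array serialization needs custom handling based on array content type
--       J.Set_Field ("{field_name}", GNATCOLL.JSON.To_JSON (Your_Array_To_JSON_Function (Self.{field_name})));'''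
--     serialization_procedures += '''
--       return GNATCOLL.JSON.JSON_Value'Class (J);
--    end To_JSON;'''
--
--     return serialization_procedures
-- ===== SOURCE B (Python) =====
-- def _value_expr(field_type, field_name):
--     # Build the Ada value expression compositionally from the shared "Self.x" reference.
--     ref = 'Self.' + field_name
--     if field_type == 'enum':
--         return 'GNATCOLL.JSON.To_JSON (GNATCOLL.JSON.Create_String (To_String (' + ref + ')))'
--     if field_type in ('integer', 'number', 'boolean'):
--         return 'GNATCOLL.JSON.To_JSON (' + ref + ')'
--     if field_type == 'string':
--         return 'GNATCOLL.JSON.Create_String (To_Unbounded_String (' + ref + '))'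
--     if field_type == 'array':
--         return 'GNATCOLL.JSON.To_JSON (Your_Array_To_JSON_Function (' + ref + '))'
--     return None
--
--
-- def _body(fields):
--     # Recursively build the function body back-to-front, ending with the footer.
--     if not fields:
--         return "\n      return GNATCOLL.JSON.JSON_Value'Class (J);\n   end To_JSON;"
--     (field_name, field_def), rest_out = fields[0], _body(fields[1:])
--     field_type = field_def.get('type')
--     expr = _value_expr(field_type, field_name)
--     if expr is None:
--         return rest_out
--     line = '\n      J.Set_Field ("' + field_name + '", ' + expr + ');'
--     if field_type == 'array':
--         line = '\n      -- Array serialization needs custom handling based on array content type' + line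
--     return line + rest_out
--
--
-- def generate_serialization_subprograms(class_name, fields):
--     return ("\n   function To_JSON (Self : " + class_name
--             + ") return GNATCOLL.JSON.JSON_Value'Class is"
--             + "\n      J : GNATCOLL.JSON.JSON_Object := GNATCOLL.JSON.Create_Object;"
--             + "\n   begin"
--             + _body(list(fields)))
-- ===== Notes on version B (the rewrite author's own statement) =====
-- stated objective: alternative
-- what changed: Replaces A's single forward loop with string += of whole-line templates by a recursion that builds the body back-to-front (tail first, footer as base case) and synthesizes each Set_Field line compositionally from a shared value-expression builder instead of per-type full-line templates.
import Mathlib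
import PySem

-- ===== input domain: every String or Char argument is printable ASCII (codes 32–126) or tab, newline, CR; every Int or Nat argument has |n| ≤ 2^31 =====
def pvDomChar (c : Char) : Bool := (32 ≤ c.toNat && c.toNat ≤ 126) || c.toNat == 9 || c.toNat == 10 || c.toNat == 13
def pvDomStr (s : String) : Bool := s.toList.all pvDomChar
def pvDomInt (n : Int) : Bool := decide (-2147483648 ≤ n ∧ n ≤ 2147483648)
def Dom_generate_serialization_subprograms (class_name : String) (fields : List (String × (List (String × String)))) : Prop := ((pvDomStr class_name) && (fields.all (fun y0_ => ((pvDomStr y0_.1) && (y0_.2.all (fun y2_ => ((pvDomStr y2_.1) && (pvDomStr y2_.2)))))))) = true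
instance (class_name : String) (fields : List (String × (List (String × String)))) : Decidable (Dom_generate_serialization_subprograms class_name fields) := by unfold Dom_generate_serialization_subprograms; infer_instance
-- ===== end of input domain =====

-- B rebuilds the Ada text by a back-to-front recursion over the fields (footer as base case),
-- synthesizing each Set_Field line from a shared value-expression builder instead of A's
-- forward loop over whole-line templates (objective: alternative; same cost).


-- ===== PORT A =====
def generate_serialization_subprograms (class_name : String) (fields : List (String × (List (String × String)))) : String :=
  let init : String := "\n   function To_JSON (Self : " ++ class_name ++ ") return GNATCOLL.JSON.JSON_Value'Class is\n      J : GNATCOLL.JSON.JSON_Object := GNATCOLL.JSON.Create_Object;\n   begin"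
  let body := fields.foldl (fun acc fp =>
    let field_name := fp.1
    let field_type := (PySem.Dict.mk fp.2).get? "type"
    if field_type == some "enum" then
      acc ++ ("\n      J.Set_Field (\"" ++ field_name ++ "\", GNATCOLL.JSON.To_JSON (GNATCOLL.JSON.Create_String (To_String (Self." ++ field_name ++ "))));")
    else if field_type == some "integer" || field_type == some "number" then
      acc ++ ("\n      J.Set_Field (\"" ++ field_name ++ "\", GNATCOLL.JSON.To_JSON (Self." ++ field_name ++ "));")
    else if field_type == some "string" then
      acc ++ ("\n      J.Set_Field (\"" ++ field_name ++ "\", GNATCOLL.JSON.Create_String (To_Unbounded_String (Self." ++ field_name ++ ")));")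
    else if field_type == some "boolean" then
      acc ++ ("\n      J.Set_Field (\"" ++ field_name ++ "\", GNATCOLL.JSON.To_JSON (Self." ++ field_name ++ "));")
    else if field_type == some "array" then
      acc ++ ("\n      -- Array serialization needs custom handling based on array content type\n      J.Set_Field (\"" ++ field_name ++ "\", GNATCOLL.JSON.To_JSON (Your_Array_To_JSON_Function (Self." ++ field_name ++ ")));")
    else acc) init
  body ++ "\n      return GNATCOLL.JSON.JSON_Value'Class (J);\n   end To_JSON;"

-- ===== PORT B =====
-- _value_expr: build the Ada value expression compositionally from the shared "Self.x" reference
-- (field_type may be Python None, hence Option String).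
def pvValueExpr (field_type : Option String) (field_name : String) : Option String :=
  let ref := "Self." ++ field_name
  if field_type == some "enum" then
    some ("GNATCOLL.JSON.To_JSON (GNATCOLL.JSON.Create_String (To_String (" ++ ref ++ ")))")
  else if field_type == some "integer" || field_type == some "number" || field_type == some "boolean" then
    some ("GNATCOLL.JSON.To_JSON (" ++ ref ++ ")")
  else if field_type == some "string" then
    some ("GNATCOLL.JSON.Create_String (To_Unbounded_String (" ++ ref ++ "))")
  else if field_type == some "array" then
    some ("GNATCOLL.JSON.To_JSON (Your_Array_To_JSON_Function (" ++ ref ++ "))")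
  else none

-- _body: recursion building the function body back-to-front, ending with the footer.
def pvBody : List (String × (List (String × String))) → String
  | [] => "\n      return GNATCOLL.JSON.JSON_Value'Class (J);\n   end To_JSON;"
  | (field_name, field_def) :: rest =>
    let rest_out := pvBody rest
    let field_type := (PySem.Dict.mk field_def).get? "type"
    match pvValueExpr field_type field_name with
    | none => rest_out
    | some expr =>
      let line := "\n      J.Set_Field (\"" ++ field_name ++ "\", " ++ expr ++ ");"
      let line := if field_type == some "array" then
          "\n      -- Array serialization needs custom handling based on array content type" ++ line
        else line
      line ++ rest_out

def generate_serialization_subprograms_alt (class_name : String) (fields : List (String × (List (String × String)))) : String :=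
  "\n   function To_JSON (Self : " ++ class_name
    ++ ") return GNATCOLL.JSON.JSON_Value'Class is"
    ++ "\n      J : GNATCOLL.JSON.JSON_Object := GNATCOLL.JSON.Create_Object;"
    ++ "\n   begin"
    ++ pvBody fields

-- ===== PRECONDITION & SPEC =====
def Spec_generate_serialization_subprograms (class_name : String) (fields : List (String × (List (String × String)))) (out : String) : Prop := out = generate_serialization_subprograms_alt class_name fields
instance (class_name : String) (fields : List (String × (List (String × String)))) (out : String) : Decidable (Spec_generate_serialization_subprograms class_name fields out) := by unfold Spec_generate_serialization_subprograms; infer_instance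

-- ===== CLAIM (what is proved, stated in full; the proofs are below) =====
def Claim_equal_generate_serialization_subprograms : Prop := ∀ (class_name : String) (fields : List (String × (List (String × String)))), Dom_generate_serialization_subprograms class_name fields → Spec_generate_serialization_subprograms class_name fields (generate_serialization_subprograms class_name fields)

-- ===== LEMMAS AND PROOFS =====

def pvStepA (acc : String) (fp : String × (List (String × String))) : String :=
  let field_name := fp.1
  let field_type := (PySem.Dict.mk fp.2).get? "type"
  if field_type == some "enum" then
    acc ++ ("\n      J.Set_Field (\"" ++ field_name ++ "\", GNATCOLL.JSON.To_JSON (GNATCOLL.JSON.Create_String (To_String (Self." ++ field_name ++ "))));")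
  else if field_type == some "integer" || field_type == some "number" then
    acc ++ ("\n      J.Set_Field (\"" ++ field_name ++ "\", GNATCOLL.JSON.To_JSON (Self." ++ field_name ++ "));")
  else if field_type == some "string" then
    acc ++ ("\n      J.Set_Field (\"" ++ field_name ++ "\", GNATCOLL.JSON.Create_String (To_Unbounded_String (Self." ++ field_name ++ ")));")
  else if field_type == some "boolean" then
    acc ++ ("\n      J.Set_Field (\"" ++ field_name ++ "\", GNATCOLL.JSON.To_JSON (Self." ++ field_name ++ "));")
  else if field_type == some "array" then
    acc ++ ("\n      -- Array serialization needs custom handling based on array content type\n      J.Set_Field (\"" ++ field_name ++ "\", GNATCOLL.JSON.To_JSON (Your_Array_To_JSON_Function (Self." ++ field_name ++ ")));")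
  else acc

set_option maxRecDepth 8192 in
lemma pvStep_body (acc : String) (fp : String × (List (String × String)))
    (rest : List (String × (List (String × String)))) :
    pvStepA acc fp ++ pvBody rest = acc ++ pvBody (fp :: rest) := by
  obtain ⟨n, fd⟩ := fp
  rw [pvBody]
  unfold pvStepA pvValueExpr
  cases h : (PySem.Dict.mk fd).get? "type" with
  | none =>
      apply String.toList_inj.mp
      simp [String.toList_append]
  | some t =>
      by_cases h1 : t = "enum"
      · subst h1; apply String.toList_inj.mp; simp [String.toList_append]
      · by_cases h2 : t = "integer"
        · subst h2; apply String.toList_inj.mp; simp [String.toList_append]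
        · by_cases h3 : t = "number"
          · subst h3; apply String.toList_inj.mp; simp [String.toList_append]
          · by_cases h4 : t = "string"
            · subst h4; apply String.toList_inj.mp; simp [String.toList_append]
            · by_cases h5 : t = "boolean"
              · subst h5; apply String.toList_inj.mp; simp [String.toList_append]
              · by_cases h6 : t = "array"
                · subst h6; apply String.toList_inj.mp; simp [String.toList_append]
                · apply String.toList_inj.mp
                  simp [String.toList_append, h1, h2, h3, h4, h5, h6]

lemma pvFold_body (l : List (String × (List (String × String)))) (acc : String) :
    l.foldl pvStepA acc ++ "\n      return GNATCOLL.JSON.JSON_Value'Class (J);\n   end To_JSON;"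
      = acc ++ pvBody l := by
  induction l generalizing acc with
  | nil => simp [pvBody]
  | cons fp rest ih =>
      rw [List.foldl_cons, ih, pvStep_body]

-- ===== VERDICT (by name: the statement is the Claim_ definition above) =====
theorem generate_serialization_subprograms_spec : Claim_equal_generate_serialization_subprograms := by
  intro class_name fields _
  unfold Spec_generate_serialization_subprograms
  show (fields.foldl pvStepA _) ++ _ = _
  rw [pvFold_body]
  unfold generate_serialization_subprograms_alt
  apply String.toList_inj.mp
  simp [String.toList_append]
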